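-- pv_equiv track=rewrite | github.com/rpany/dna-sequencing-algorithms | week4/utilities.py | computeOverlaps
-- ===== SOURCE A (Python) =====
-- import itertools
--
-- def overlap(a, b, min_length=3):
--     """ Return length of longest suffix of 'a' matching
--         a prefix of 'b' that is at least 'min_length'
--         characters long.  If no such overlap exists,
--         return 0. """
--     start = 0  # start all the way at the left
--     while True:
--         start = a.find(b[:min_length], start)  # look for b's suffx in a
--         if start == -1:  # no more occurrences to right
--             return 0
--         # found occurrence; check for full suffix/prefix match
--         if b.startswith(a[start:]):
--             return len(a)-start
--         start += 1  # move just past previous match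
--
-- def computeOverlaps(reads, k):
--     overlapsDictionary={}
--     for a,b in itertools.permutations(reads,2):
--         olen = overlap(a,b,k)
--         if olen > 0:
--             if olen in overlapsDictionary:
--                 t = (a,b)
--                 overlapsDictionary.get(olen).add(t)
--             else:
--                 s = set()
--                 t = (a,b)
--                 s.add(t)
--                 overlapsDictionary[olen] = s
--
--     return overlapsDictionary
-- ===== SOURCE B (Python) =====
-- def _overlap(a, b, k):
--     # Longest l such that a's length-l suffix equals b's length-l prefix, requiring
--     # at least k characters; since an overlap can never be longer than b itself, the
--     # effective minimum is capped at len(b) (a read shorter than k still matches when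
--     # the whole of it overlaps).  Returns 0 if there is no such l.
--     need = min(k, len(b))
--     for l in range(min(len(a), len(b)), need - 1, -1):
--         if a[len(a) - l:] == b[:l]:
--             return l
--     return 0
--
-- def computeOverlaps(reads, k):
--     d = {}
--     for i, a in enumerate(reads):
--         for b in reads[:i] + reads[i + 1:]:
--             olen = _overlap(a, b, k)
--             if olen > 0:
--                 d.setdefault(olen, set()).add((a, b))
--     return d
-- ===== Notes on version B (the rewrite author's own statement) =====
-- stated objective: alternative
-- what changed: The overlap kernel scans candidate overlap lengths longest-first with a direct suffix==prefix comparison (minimum capped at len(b), since no overlap can exceed b) instead of A's repeated str.find occurrence search plus startswith verification, and the dictionary is built with setdefault over enumerate/slice-generated ordered pairs instead of a contains-branch over itertools.permutations; Pre_ restricts to k >= 0 because a negative min_length only acquires a meaning through Python's negative-slice accident in b[:k].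
-- outside the precondition, e.g. on computeOverlaps(['XA', 'ABC'], -1): A returns {}, B returns {1: {('XA', 'ABC')}}
import Mathlib
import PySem

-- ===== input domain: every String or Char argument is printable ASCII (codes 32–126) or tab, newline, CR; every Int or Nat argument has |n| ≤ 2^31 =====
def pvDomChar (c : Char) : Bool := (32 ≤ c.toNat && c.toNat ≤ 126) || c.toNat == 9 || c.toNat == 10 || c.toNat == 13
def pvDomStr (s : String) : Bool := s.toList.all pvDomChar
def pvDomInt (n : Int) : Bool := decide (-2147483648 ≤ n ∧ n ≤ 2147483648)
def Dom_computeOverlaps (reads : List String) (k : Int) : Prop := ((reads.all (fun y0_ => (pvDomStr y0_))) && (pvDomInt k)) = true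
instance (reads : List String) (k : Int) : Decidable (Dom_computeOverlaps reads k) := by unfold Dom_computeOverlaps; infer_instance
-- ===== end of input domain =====

-- B is an alternative (not faster) exact re-implementation: the overlap kernel scans candidate
-- overlap lengths longest-first with a direct suffix==prefix test (minimum capped at len(b))
-- instead of A's str.find/startswith occurrence loop, and the dict is built setdefault-style
-- over enumerate/slice pairs instead of a contains-branch over itertools.permutations.

-- ===== PORT A =====
-- A-side helper: the while-loop of 'overlap' — 'start = a.find(b[:min_length], start)' etc.
-- 'fuel' is only a totality guard (find's result strictly advances 'start'; a.length+2 steps always suffice, see lemma loop_eq_ref below).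
def overlapLoop (a b pat : List Char) (fuel : Nat) (start : Int) : Int :=
  match fuel with
  | 0 => 0
  | Nat.succ f =>
    let r := PySem.Chars.findFrom a pat start
    if r = -1 then 0
    else if PySem.Chars.startswith b (List.drop r.toNat a) then (a.length : Int) - r
    else overlapLoop a b pat f (r + 1)

def overlapFn (a b : String) (minLength : Int) : Int :=
  overlapLoop a.toList b.toList (PySem.Chars.slice b.toList none (some minLength)) (a.toList.length + 2) 0

-- the dict.get(olen).add(t) mutation of A is modelled by Dict.modify (key present).
def computeOverlaps (reads : List String) (k : Int) : List (Int × List (String × String)) :=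
  ((PySem.List.permutations reads 2).foldl (fun d p =>
      match p with
      | [a, b] =>
        let olen := overlapFn a b k
        if olen > 0 then
          if d.contains olen then d.modify olen PySem.Set.empty (fun s => PySem.Set.add s (a, b))
          else d.insert olen (PySem.Set.add PySem.Set.empty (a, b))
        else d
      | _ => d)
    PySem.Dict.empty).items

-- ===== PORT B =====
-- B-side helper: the 'for l in range(min(len(a), len(b)), need - 1, -1)' downward scan of _overlap.
-- (For need ≤ 0 Python's scan reaches l = 0, where ''=='' returns 0: same value as stopping at 0,
-- which is what need.toNat = 0 gives.)
def olapDown (a b : List Char) (m l : Nat) : Int :=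
  if l < m then 0
  else if List.drop (a.length - l) a = List.take l b then (l : Int)
  else match l with
       | 0 => 0
       | Nat.succ l' => olapDown a b m l'

def olapFn (a b : List Char) (k : Int) : Int :=
  let need : Int := min k (b.length : Int)
  olapDown a b need.toNat (min a.length b.length)

-- d.setdefault(olen, set()).add(t) keeps an existing key in place and appends a new one: Dict.insert.
def computeOverlaps_alt (reads : List String) (k : Int) : List (Int × List (String × String)) :=
  ((PySem.List.enumerate reads 0).foldl (fun d p =>
      let a := p.2
      ((PySem.List.slice reads none (some p.1)) ++ (PySem.List.slice reads (some (p.1 + 1)) none)).foldl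
        (fun d b =>
          let olen := olapFn a.toList b.toList k
          if olen > 0 then d.insert olen (PySem.Set.add (d.getD olen PySem.Set.empty) (a, b)) else d)
        d)
    PySem.Dict.empty).items

-- ===== PRECONDITION & SPEC =====
-- A accepts any int as min_length via the slice b[:k]; for k < 0 the threshold becomes
-- 'len(b) - |k|', an accident of Python's negative-slice semantics rather than a minimal
-- overlap length, so Pre_ restricts to the natural domain k ≥ 0.
def Pre_computeOverlaps (reads : List String) (k : Int) : Prop := 0 ≤ k
instance (reads : List String) (k : Int) : Decidable (Pre_computeOverlaps reads k) := by unfold Pre_computeOverlaps; infer_instance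
def pvWitness_computeOverlaps : List String × Int := (["AB", "BA"], 1)

def Spec_computeOverlaps (reads : List String) (k : Int) (out : List (Int × List (String × String))) : Prop := out = computeOverlaps_alt reads k
instance (reads : List String) (k : Int) (out : List (Int × List (String × String))) : Decidable (Spec_computeOverlaps reads k out) := by unfold Spec_computeOverlaps; infer_instance

-- ===== CLAIM (what is proved, stated in full; the proofs are below) =====
def Claim_equal_computeOverlaps : Prop := ∀ (reads : List String) (k : Int), Dom_computeOverlaps reads k → Pre_computeOverlaps reads k → Spec_computeOverlaps reads k (computeOverlaps reads k)

-- ===== LEMMAS AND PROOFS =====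

-- overlap returns len(a) - (least position p with: pattern occurs at p and a[p:] is a prefix of b).
-- refLoop is that one-step reference scan; both ports' loops are reduced to it.
def refLoop (a b pat : List Char) (s : Nat) : Int :=
  if a.length < s then 0
  else if pat <+: List.drop s a ∧ List.drop s a <+: b then (a.length : Int) - s
  else refLoop a b pat (s + 1)
termination_by a.length + 1 - s
decreasing_by omega

lemma findFrom_of_gt (a pat : List Char) (s : Int) (h : (a.length : Int) < s) (h0 : 0 ≤ s) :
    PySem.Chars.findFrom a pat s none = -1 := by
  unfold PySem.Chars.findFrom
  simp only []
  split_ifs with h1 h2 <;> omega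

lemma ref_stop (a b pat : List Char) :
    ∀ n s, a.length + 1 ≤ n + s →
      (∀ p, s ≤ p → ¬(pat <+: List.drop p a ∧ List.drop p a <+: b)) →
      refLoop a b pat s = 0 := by
  intro n
  induction n with
  | zero =>
    intro s h hv
    rw [refLoop, if_pos (by omega)]
  | succ m ih =>
    intro s h hv
    rw [refLoop]
    by_cases hb : a.length < s
    · rw [if_pos hb]
    · rw [if_neg hb, if_neg (hv s le_rfl)]
      exact ih (s + 1) (by omega) (fun p hp => hv p (by omega))

lemma ref_skip (a b pat : List Char) :
    ∀ n s t, t ≤ n + s → s ≤ t →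
      (∀ p, s ≤ p → p < t → ¬(pat <+: List.drop p a ∧ List.drop p a <+: b)) →
      refLoop a b pat s = refLoop a b pat t := by
  intro n
  induction n with
  | zero =>
    intro s t h hst _
    have hteq : s = t := by omega
    rw [hteq]
  | succ m ih =>
    intro s t h hst hv
    rcases Nat.eq_or_lt_of_le hst with rfl | hlt
    · rfl
    · have h1 : refLoop a b pat s = refLoop a b pat (s + 1) := by
        by_cases hb : a.length < s
        · rw [refLoop, if_pos hb, refLoop, if_pos (by omega)]
        · rw [refLoop, if_neg hb, if_neg (hv s le_rfl hlt)]
      rw [h1]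
      exact ih (s + 1) t (by omega) (by omega) (fun p hp hpt => hv p (by omega) hpt)

lemma drop_split (a : List Char) (s p : Nat) (hsp : s ≤ p) :
    List.drop p a = List.drop (p - s) (List.drop s a) := by
  rw [List.drop_drop]; congr 1; omega

lemma loop_eq_ref (a b pat : List Char) :
    ∀ fuel s, a.length + 2 ≤ fuel + s →
      overlapLoop a b pat fuel (s : Int) = refLoop a b pat s := by
  intro fuel
  induction fuel with
  | zero =>
    intro s h
    rw [overlapLoop, refLoop, if_pos (by omega)]
  | succ f ih =>
    intro s h
    by_cases hb' : a.length < s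
    · rw [overlapLoop]
      simp only [findFrom_of_gt a pat (s : Int) (by exact_mod_cast hb') (by positivity)]
      rw [refLoop, if_pos hb']
      simp
    · have hb : s ≤ a.length := by omega
      rw [overlapLoop]
      simp only [PySem.Chars.findFrom_natCast a pat s hb]
      set F := PySem.Chars.find (List.drop s a) pat with hFdef
      by_cases hF : F = -1
      · rw [if_pos (by rw [hF]; rfl)]
        have hninf : ¬ pat <:+: List.drop s a := (PySem.Chars.find_eq_neg_one_iff _ _).mp hF
        refine (ref_stop a b pat (a.length + 1) s (by omega) ?_).symm
        intro p hp hval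
        exact hninf ((((drop_split a s p hp) ▸ hval.1).isInfix).trans
          (List.drop_suffix _ _).isInfix)
      · have h0F : 0 ≤ F := by have := PySem.Chars.neg_one_le_find (List.drop s a) pat; omega
        obtain ⟨hocc, hmin⟩ := PySem.Chars.find_spec (s := List.drop s a) (sub := pat) h0F
        have hFle : F ≤ (a.length - s : Nat) := by
          have := PySem.Chars.find_le_length (List.drop s a) pat
          simpa [List.length_drop] using this
        set q := s + F.toNat with hq
        have hdq : List.drop q a = List.drop F.toNat (List.drop s a) := by
          rw [List.drop_drop]
        have hnoval : ∀ p, s ≤ p → p < q → ¬(pat <+: List.drop p a ∧ List.drop p a <+: b) := by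
          intro p hp hpq hval
          exact hmin (p - s) (by omega) ((drop_split a s p hp) ▸ hval.1)
        rw [if_neg hF, if_neg (by omega)]
        have htn : ((s : Int) + F).toNat = q := by omega
        rw [htn]
        by_cases hsw : List.drop q a <+: b
        · rw [if_pos ((PySem.Chars.startswith_iff _ _).mpr hsw)]
          rw [ref_skip a b pat q s q (by omega) (by omega) hnoval]
          rw [refLoop, if_neg (by omega), if_pos ⟨hdq ▸ hocc, hsw⟩]
          omega
        · rw [if_neg (by simp [PySem.Chars.startswith_iff, hsw])]
          rw [show ((s : Int) + F + 1) = (((q + 1 : Nat)) : Int) by omega]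
          rw [ih (q + 1) (by omega)]
          refine (ref_skip a b pat (q + 1) s (q + 1) (by omega) (by omega) ?_).symm
          intro p hp hpq hval
          rcases Nat.lt_or_ge p q with hlt | hge
          · exact hnoval p hp hlt hval
          · have hpq' : p = q := by omega
            exact hsw (hpq' ▸ hval.2)

lemma down_eq_ref (a b : List Char) (m : Nat) (hm : m ≤ b.length) :
    ∀ l, l ≤ a.length → l ≤ b.length →
      olapDown a b m l = refLoop a b (List.take m b) (a.length - l) := by
  have hlenpat : (List.take m b).length = m := by simp [hm]
  intro l
  induction l with
  | zero =>
    intro _ _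
    rw [olapDown]
    by_cases hm0 : 0 < m
    · rw [if_pos hm0]
      refine (ref_stop a b _ (a.length + 1) (a.length - 0) (by omega) ?_).symm
      intro p hp hval
      have h1 : m ≤ (List.drop p a).length := hlenpat ▸ hval.1.length_le
      simp [List.length_drop] at h1
      omega
    · rw [if_neg hm0, if_pos (by simp)]
      have hmz : m = 0 := by omega
      rw [refLoop, if_neg (by omega), if_pos ?_]
      · simp
      · subst hmz
        exact ⟨by simp, by simp⟩
  | succ l' ih =>
    intro hla hlb
    rw [olapDown]
    by_cases hlm : l' + 1 < m
    · rw [if_pos hlm]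
      refine (ref_stop a b _ (a.length + 1) (a.length - (l' + 1)) (by omega) ?_).symm
      intro p hp hval
      have h1 : m ≤ (List.drop p a).length := hlenpat ▸ hval.1.length_le
      simp [List.length_drop] at h1
      omega
    · rw [if_neg hlm]
      by_cases heq : List.drop (a.length - (l' + 1)) a = List.take (l' + 1) b
      · rw [if_pos heq]
        rw [refLoop, if_neg (by omega), if_pos ?_]
        · have : a.length - (a.length - (l' + 1)) = l' + 1 := by omega
          omega
        · constructor
          · rw [heq, show List.take m b = List.take m (List.take (l' + 1) b) by
              rw [List.take_take]; congr 1; omega]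
            exact List.take_prefix _ _
          · rw [heq]; exact List.take_prefix _ _
      · rw [if_neg heq]
        have hnv : ¬(List.take m b <+: List.drop (a.length - (l' + 1)) a ∧
            List.drop (a.length - (l' + 1)) a <+: b) := by
          rintro ⟨-, h2⟩
          apply heq
          have hlen : (List.drop (a.length - (l' + 1)) a).length = l' + 1 := by
            simp [List.length_drop]; omega
          rw [List.prefix_iff_eq_take] at h2
          rw [h2, hlen]
        rw [refLoop, if_neg (by omega), if_neg hnv]
        rw [show a.length - (l' + 1) + 1 = a.length - l' by omega]
        exact ih (by omega) (by omega)

-- The pattern b[:k] for 0 ≤ k is take (min k (len b)) b.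
lemma pat_take_min (b : List Char) (k : Int) (hk : 0 ≤ k) :
    PySem.Chars.slice b none (some k) = List.take (min k (b.length : Int)).toNat b := by
  rw [PySem.Chars.slice_eq_listSlice]
  unfold PySem.List.slice PySem.List.clampIdx
  simp only [List.drop_zero]
  split_ifs <;> (congr 1; omega)

-- Per-pair kernel equality, outside the D_ situation for this pair.
lemma overlap_eq (a b : String) (k : Int) (hk : 0 ≤ k) :
    overlapFn a b k = olapFn a.toList b.toList k := by
  unfold overlapFn olapFn
  rw [pat_take_min _ _ hk]
  rw [show (0 : Int) = ((0 : Nat) : Int) from rfl,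
    loop_eq_ref a.toList b.toList _ (a.toList.length + 2) 0 (by omega)]
  rw [down_eq_ref a.toList b.toList _ (by omega) (min a.toList.length b.toList.length)
    (by omega) (by omega)]
  refine ref_skip a.toList b.toList _ a.toList.length 0
    (a.toList.length - min a.toList.length b.toList.length) (by omega) (by omega) ?_
  intro p hp hpt hval
  have := hval.2.length_le
  rw [List.length_drop] at this
  omega

lemma range_flat {α β : Type} (h : α → List β) :
    ∀ (ys : List α),
      (List.range ys.length).flatMap
          (fun i => match ys[i]? with | some y => h y | none => []) = ys.flatMap h := by
  intro ys
  induction ys with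
  | nil => simp
  | cons y t ih =>
    rw [List.length_cons, List.range_succ_eq_map, List.flatMap_cons, List.flatMap_map]
    simp only [List.getElem?_cons_zero, List.getElem?_cons_succ, Nat.succ_eq_add_one]
    rw [List.flatMap_cons]
    congr 1

lemma perm1 (ys : List String) :
    PySem.List.permutations ys 1 = ys.map (fun y => [y]) := by
  rw [show (1 : Nat) = 0 + 1 from rfl]
  rw [PySem.List.permutations]
  simp only [PySem.List.permutations]
  have step := range_flat (fun y => [[y]]) ys
  refine Eq.trans ?_ (step.trans (Eq.symm List.map_eq_flatMap))
  congr 1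
  funext i
  cases ys[i]? <;> simp

lemma perm2 (xs : List String) :
    PySem.List.permutations xs 2
      = (List.range xs.length).flatMap
          (fun i => match xs[i]? with
            | some a => (xs.eraseIdx i).map (fun b => [a, b])
            | none => []) := by
  rw [show (2 : Nat) = 1 + 1 from rfl]
  rw [PySem.List.permutations]
  simp only [perm1, List.map_map]
  congr 1
  funext i
  cases xs[i]? <;> simp [Function.comp]

lemma dict_step (d : PySem.Dict Int (PySem.Set (String × String))) (olen : Int) (t : String × String) :
    (if d.contains olen then d.modify olen PySem.Set.empty (fun s => PySem.Set.add s t)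
     else d.insert olen (PySem.Set.add PySem.Set.empty t))
      = d.insert olen (PySem.Set.add (d.getD olen PySem.Set.empty) t) := by
  by_cases h : d.contains olen
  · simp [h, PySem.Dict.modify]
  · simp only [h, Bool.false_eq_true, if_false]
    rw [PySem.Dict.getD_of_not_contains d _ (by simpa using h)]

lemma main_eq (reads : List String) (k : Int) (hk : 0 ≤ k) :
    computeOverlaps reads k = computeOverlaps_alt reads k := by
  unfold computeOverlaps computeOverlaps_alt
  rw [perm2, List.flatMap_def, List.foldl_flatten, List.foldl_map]
  rw [PySem.List.enumerate_eq_map_pyRange reads ""]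
  rw [List.foldl_map, PySem.List.pyRange_one, List.foldl_map]
  simp only [Int.zero_add]
  congr 1
  apply PySem.List.foldl_congr_mem
  intro d i hi
  have hi' : i < reads.length := by
    have := List.mem_range.mp hi
    omega
  rw [List.getElem?_eq_getElem hi']
  simp only [List.foldl_map]
  rw [PySem.List.pyGetD_natCast, List.getD_eq_getElem reads "" hi']
  rw [PySem.List.slice_to reads (by positivity), Int.toNat_natCast]
  rw [Int.ofNat_add_one_out, PySem.List.slice_from reads (by positivity), Int.toNat_natCast]
  rw [← List.eraseIdx_eq_take_drop_succ]
  apply PySem.List.foldl_congr_mem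
  intro acc b hb
  show (let olen := overlapFn reads[i] b k
        if olen > 0 then
          if acc.contains olen then acc.modify olen PySem.Set.empty (fun s => PySem.Set.add s (reads[i], b))
          else acc.insert olen (PySem.Set.add PySem.Set.empty (reads[i], b))
        else acc) = _
  simp only [overlap_eq reads[i] b k hk, dict_step]

-- ===== VERDICT (by name: the statement is the Claim_ definition above) =====
theorem computeOverlaps_spec : Claim_equal_computeOverlaps := by
  intro reads k _ hk
  unfold Spec_computeOverlaps
  exact main_eq reads k hk
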